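-- pv_equiv track=rewrite | github.com/Arshtyi/RoyaleAnalyze | src/formal.py | convert_time_format
-- ===== SOURCE A (Python) =====
-- def convert_time_format(input_str):
--     time_units = {"w": "周", "d": "天", "h": "小时", "m": "分钟"}
--     time_values = {"w": 0, "d": 0, "h": 0, "m": 0}
--     parts = input_str.split()
--     for part in parts:
--         if part.endswith("w"):
--             time_values["w"] = int(part[:-1])
--         elif part.endswith("d"):
--             time_values["d"] = int(part[:-1])
--         elif part.endswith("h"):
--             time_values["h"] = int(part[:-1])
--         elif part.endswith("m"):
--             time_values["m"] = int(part[:-1])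
--     output = []
--     if time_values["w"] > 0:
--         output.append(f"{time_values['w']}周")
--     if time_values["d"] > 0 or (time_values["w"] > 0 and (time_values["h"] > 0 or time_values["m"] > 0)):
--         output.append(f"{time_values['d']}天")
--     if time_values["h"] > 0 or ((time_values["w"] > 0 or time_values["d"] > 0) and time_values["m"] > 0):
--         output.append(f"{time_values['h']}时")
--     if time_values["m"] > 0:
--         output.append(f"{time_values['m']}分")
--
--     return "".join(output)
-- ===== SOURCE B (Python) =====
-- def convert_time_format(input_str):
--     vals = {"w": 0, "d": 0, "h": 0, "m": 0}
--     for p in input_str.split():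
--         if p and p[-1] in "wdhm":
--             vals[p[-1]] = int(p[:-1])
--     labels = {"w": "周", "d": "天", "h": "时", "m": "分"}
--     units = "wdhm"
--     nz = [i for i, u in enumerate(units) if vals[u] > 0]
--     if not nz:
--         return ""
--     return "".join(f"{vals[u]}{labels[u]}" for u in units[nz[0]:nz[-1] + 1])
-- ===== Notes on version B (the rewrite author's own statement) =====
-- stated objective: simpler
-- what changed: Replaces A's four hand-written compound boolean emit-conditions with a single computation: collect the nonzero unit indices over the fixed order w,d,h,m and emit every unit from the first to the last nonzero one.
import Mathlib
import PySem

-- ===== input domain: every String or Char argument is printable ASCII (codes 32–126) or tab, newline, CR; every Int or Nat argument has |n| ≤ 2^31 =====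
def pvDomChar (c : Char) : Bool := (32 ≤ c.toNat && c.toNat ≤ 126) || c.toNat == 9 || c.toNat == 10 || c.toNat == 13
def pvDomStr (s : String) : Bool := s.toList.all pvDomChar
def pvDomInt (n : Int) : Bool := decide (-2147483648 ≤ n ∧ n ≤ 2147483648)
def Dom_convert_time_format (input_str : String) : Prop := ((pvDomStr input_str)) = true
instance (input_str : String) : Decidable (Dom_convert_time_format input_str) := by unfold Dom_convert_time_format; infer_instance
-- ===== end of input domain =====

-- B replaces A's four compound emit-conditions by emitting every unit from the first to the last nonzero one (objective: simpler).

-- ===== PORT A =====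
-- int(part[:-1]) ; .getD 0 is never reached under Pre_ (Pre_ demands the conversion succeed)
def pvPartInt (p : String) : Int :=
  (PySem.Int.ofStr? (PySem.Str.slice p none (some (-1)))).getD 0

def pvStepA (tv : Int × Int × Int × Int) (part : String) : Int × Int × Int × Int :=
  if PySem.Str.endswith part "w" then (pvPartInt part, tv.2.1, tv.2.2.1, tv.2.2.2)
  else if PySem.Str.endswith part "d" then (tv.1, pvPartInt part, tv.2.2.1, tv.2.2.2)
  else if PySem.Str.endswith part "h" then (tv.1, tv.2.1, pvPartInt part, tv.2.2.2)
  else if PySem.Str.endswith part "m" then (tv.1, tv.2.1, tv.2.2.1, pvPartInt part)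
  else tv

def pvEmitA (w d h m : Int) : String :=
  let output : List String := []
  let output := if w > 0 then output ++ [PySem.Int.toStr w ++ "周"] else output
  let output := if d > 0 ∨ (w > 0 ∧ (h > 0 ∨ m > 0)) then output ++ [PySem.Int.toStr d ++ "天"] else output
  let output := if h > 0 ∨ ((w > 0 ∨ d > 0) ∧ m > 0) then output ++ [PySem.Int.toStr h ++ "时"] else output
  let output := if m > 0 then output ++ [PySem.Int.toStr m ++ "分"] else output
  PySem.Str.join "" output

def convert_time_format (input_str : String) : String :=
  let tv := (PySem.Str.split₀ input_str).foldl pvStepA (0, 0, 0, 0)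
  pvEmitA tv.1 tv.2.1 tv.2.2.1 tv.2.2.2

-- ===== PORT B =====
def pvStepB (d : PySem.Dict Char Int) (p : String) : PySem.Dict Char Int :=
  match p.toList.getLast? with           -- 'if p': p[-1] exists iff p nonempty
  | some c => if c = 'w' ∨ c = 'd' ∨ c = 'h' ∨ c = 'm' then d.insert c (pvPartInt p) else d
  | none => d

def pvLabels : PySem.Dict Char String :=
  PySem.Dict.ofList [('w', "周"), ('d', "天"), ('h', "时"), ('m', "分")]

def pvEmitB (vals : PySem.Dict Char Int) : String :=
  let units : List Char := ['w', 'd', 'h', 'm']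
  let nz := ((PySem.List.enumerate units).filter (fun iu => vals.getD iu.2 0 > 0)).map (·.1)
  match nz with
  | [] => ""
  | lo :: rest =>
      PySem.Str.join "" ((PySem.List.slice units (some lo) (some (rest.getLastD lo + 1))).map
        (fun u => PySem.Int.toStr (vals.getD u 0) ++ pvLabels.getD u ""))

def convert_time_format_alt (input_str : String) : String :=
  let vals := (PySem.Str.split₀ input_str).foldl pvStepB
    (PySem.Dict.ofList [('w', (0 : Int)), ('d', 0), ('h', 0), ('m', 0)])
  pvEmitB vals

-- ===== PRECONDITION & SPEC =====
-- Pre_ excludes exactly the inputs where A raises ValueError: a whitespace-separated part ends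
-- in w/d/h/m but its prefix is not a valid Python int (e.g. "w", "1.5h").
def Pre_convert_time_format (input_str : String) : Prop :=
  ∀ p ∈ PySem.Str.split₀ input_str,
    (PySem.Str.endswith p "w" = true ∨ PySem.Str.endswith p "d" = true ∨
     PySem.Str.endswith p "h" = true ∨ PySem.Str.endswith p "m" = true) →
    (PySem.Int.ofStr? (PySem.Str.slice p none (some (-1)))).isSome = true
instance (input_str : String) : Decidable (Pre_convert_time_format input_str) := by
  unfold Pre_convert_time_format; infer_instance

def pvWitness_convert_time_format : String := "2w 3d 5m"

def Spec_convert_time_format (input_str : String) (out : String) : Prop := out = convert_time_format_alt input_str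
instance (input_str : String) (out : String) : Decidable (Spec_convert_time_format input_str out) := by unfold Spec_convert_time_format; infer_instance

-- ===== CLAIM (what is proved, stated in full; the proofs are below) =====
def Claim_equal_convert_time_format : Prop := ∀ (input_str : String), Dom_convert_time_format input_str → Pre_convert_time_format input_str → Spec_convert_time_format input_str (convert_time_format input_str)

-- ===== LEMMAS AND PROOFS =====

lemma endswith_single_iff (p : String) (c : Char) :
    PySem.Str.endswith p (String.ofList [c]) = true ↔ p.toList.getLast? = some c := by
  rw [PySem.Str.endswith_eq, PySem.Chars.endswith_iff]
  rw [show (String.ofList [c]).toList = [c] from String.toList_ofList]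
  constructor
  · rintro ⟨t, h⟩; rw [← h]; simp
  · intro h
    rw [List.getLast?_eq_some_iff] at h
    obtain ⟨l', hl⟩ := h
    exact ⟨l', by simp [hl]⟩

lemma step_agree (p : String) (d : PySem.Dict Char Int) (tv : Int × Int × Int × Int)
    (h1 : d.getD 'w' 0 = tv.1) (h2 : d.getD 'd' 0 = tv.2.1)
    (h3 : d.getD 'h' 0 = tv.2.2.1) (h4 : d.getD 'm' 0 = tv.2.2.2) :
    (pvStepB d p).getD 'w' 0 = (pvStepA tv p).1 ∧
    (pvStepB d p).getD 'd' 0 = (pvStepA tv p).2.1 ∧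
    (pvStepB d p).getD 'h' 0 = (pvStepA tv p).2.2.1 ∧
    (pvStepB d p).getD 'm' 0 = (pvStepA tv p).2.2.2 := by
  have ew := endswith_single_iff p 'w'
  have ed := endswith_single_iff p 'd'
  have eh := endswith_single_iff p 'h'
  have em := endswith_single_iff p 'm'
  unfold pvStepA pvStepB
  rcases hlast : p.toList.getLast? with _ | c
  · simp_all
  · by_cases hw : c = 'w'
    · subst hw; simp_all [PySem.Dict.getD_insert]
    · by_cases hd : c = 'd'
      · subst hd; simp_all [PySem.Dict.getD_insert]
      · by_cases hh : c = 'h'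
        · subst hh; simp_all [PySem.Dict.getD_insert]
        · by_cases hm : c = 'm'
          · subst hm; simp_all [PySem.Dict.getD_insert]
          · simp_all

lemma parse_agree (parts : List String) :
    ∀ (d : PySem.Dict Char Int) (tv : Int × Int × Int × Int),
      d.getD 'w' 0 = tv.1 → d.getD 'd' 0 = tv.2.1 → d.getD 'h' 0 = tv.2.2.1 → d.getD 'm' 0 = tv.2.2.2 →
      ((parts.foldl pvStepB d).getD 'w' 0 = (parts.foldl pvStepA tv).1 ∧
       (parts.foldl pvStepB d).getD 'd' 0 = (parts.foldl pvStepA tv).2.1 ∧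
       (parts.foldl pvStepB d).getD 'h' 0 = (parts.foldl pvStepA tv).2.2.1 ∧
       (parts.foldl pvStepB d).getD 'm' 0 = (parts.foldl pvStepA tv).2.2.2) := by
  induction parts with
  | nil => intro d tv h1 h2 h3 h4; exact ⟨h1, h2, h3, h4⟩
  | cons p rest ih =>
      intro d tv h1 h2 h3 h4
      obtain ⟨g1, g2, g3, g4⟩ := step_agree p d tv h1 h2 h3 h4
      exact ih (pvStepB d p) (pvStepA tv p) g1 g2 g3 g4

lemma emit_agree (vals : PySem.Dict Char Int) (w d h m : Int)
    (hw : vals.getD 'w' 0 = w) (hd : vals.getD 'd' 0 = d)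
    (hh : vals.getD 'h' 0 = h) (hm : vals.getD 'm' 0 = m) :
    pvEmitB vals = pvEmitA w d h m := by
  have lw : pvLabels.getD 'w' "" = "周" := rfl
  have ld : pvLabels.getD 'd' "" = "天" := rfl
  have lh : pvLabels.getD 'h' "" = "时" := rfl
  have lm : pvLabels.getD 'm' "" = "分" := rfl
  unfold pvEmitA pvEmitB
  by_cases cw : w > 0 <;> by_cases cd : d > 0 <;> by_cases ch : h > 0 <;> by_cases cm : m > 0 <;>
    simp [PySem.List.enumerate_cons, PySem.List.enumerate_nil, hw, hd, hh, hm, cw, cd, ch, cm,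
      lw, ld, lh, lm, PySem.List.slice, PySem.Str.join]

-- ===== VERDICT (by name: the statement is the Claim_ definition above) =====
theorem convert_time_format_spec : Claim_equal_convert_time_format := by
  intro s _ _
  unfold Spec_convert_time_format convert_time_format convert_time_format_alt
  obtain ⟨h1, h2, h3, h4⟩ := parse_agree (PySem.Str.split₀ s)
    (PySem.Dict.ofList [('w', (0 : Int)), ('d', 0), ('h', 0), ('m', 0)]) (0, 0, 0, 0)
    (by decide) (by decide) (by decide) (by decide)
  exact (emit_agree _ _ _ _ _ h1 h2 h3 h4).symm
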